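-- pv_equiv track=rewrite | github.com/ankitkumarpansari/chroma-gtm | scripts/sync/sumble_enrich_nyc_contacts.py | filter_icp_contacts
-- ===== SOURCE A (Python) =====
-- from typing import Dict, List, Optional
--
-- ICP_JOB_FUNCTIONS = ["Engineering", "Technology", "IT", "Data Science", "Research"]
--
-- def filter_icp_contacts(people: List[Dict]) -> List[Dict]:
--     """Filter people to ICP-relevant contacts."""
--     icp_contacts = []
--
--     for person in people:
--         title = (person.get('job_title') or '').lower()
--         job_function = person.get('job_function', '')
--
--         # Check if title matches ICP
--         is_icp = False
--
--         # Check job function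
--         if job_function in ICP_JOB_FUNCTIONS:
--             is_icp = True
--
--         # Check title keywords
--         title_keywords = ['cto', 'chief', 'vp', 'vice president', 'head of',
--                         'director', 'principal', 'staff', 'lead', 'manager',
--                         'engineer', 'architect', 'scientist']
--         if any(kw in title for kw in title_keywords):
--             is_icp = True
--
--         if is_icp:
--             icp_contacts.append({
--                 'name': person.get('name', ''),
--                 'title': person.get('job_title', ''),
--                 'email': person.get('email', ''),
--                 'linkedin': person.get('linkedin_url', ''),
--                 'job_function': job_function,
--             })
--
--     # Sort by title seniority
--     def title_score(contact):
--         title = contact.get('title', '').lower()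
--         if any(t in title for t in ['cto', 'chief']):
--             return 0
--         if any(t in title for t in ['vp', 'vice president']):
--             return 1
--         if any(t in title for t in ['head of', 'director']):
--             return 2
--         if any(t in title for t in ['principal', 'staff']):
--             return 3
--         return 4
--
--     icp_contacts.sort(key=title_score)
--     return icp_contacts[:5]  # Return top 5 contacts per company
-- ===== SOURCE B (Python) =====
-- from typing import Dict, List
--
-- ICP_JOB_FUNCTIONS = ["Engineering", "Technology", "IT", "Data Science", "Research"]
--
-- _TITLE_KEYWORDS = ['cto', 'chief', 'vp', 'vice president', 'head of',
--                    'director', 'principal', 'staff', 'lead', 'manager',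
--                    'engineer', 'architect', 'scientist']
--
--
-- def _is_icp(person):
--     title = (person.get('job_title') or '').lower()
--     return (person.get('job_function', '') in ICP_JOB_FUNCTIONS
--             or any(kw in title for kw in _TITLE_KEYWORDS))
--
--
-- def _make_contact(person):
--     return {
--         'name': person.get('name', ''),
--         'title': person.get('job_title', ''),
--         'email': person.get('email', ''),
--         'linkedin': person.get('linkedin_url', ''),
--         'job_function': person.get('job_function', ''),
--     }
--
--
-- def _title_score(contact):
--     title = contact.get('title', '').lower()
--     if any(t in title for t in ['cto', 'chief']):
--         return 0
--     if any(t in title for t in ['vp', 'vice president']):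
--         return 1
--     if any(t in title for t in ['head of', 'director']):
--         return 2
--     if any(t in title for t in ['principal', 'staff']):
--         return 3
--     return 4
--
--
-- def filter_icp_contacts(people: List[Dict]) -> List[Dict]:
--     """Filter people to ICP-relevant contacts (bucket sort by seniority, top 5)."""
--     icp_contacts = [_make_contact(p) for p in people if _is_icp(p)]
--     buckets = ([], [], [], [], [])
--     for contact in icp_contacts:
--         buckets[_title_score(contact)].append(contact)
--     return (buckets[0] + buckets[1] + buckets[2] + buckets[3] + buckets[4])[:5]
-- ===== Notes on version B (the rewrite author's own statement) =====
-- stated objective: alternative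
-- what changed: B builds the ICP contact list with a filter+map comprehension instead of A's flag-setting accumulator loop, and replaces A's comparison sort by a stable 5-bucket (counting) sort on the seniority score, concatenating buckets 0..4 and taking the first 5.
import Mathlib
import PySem

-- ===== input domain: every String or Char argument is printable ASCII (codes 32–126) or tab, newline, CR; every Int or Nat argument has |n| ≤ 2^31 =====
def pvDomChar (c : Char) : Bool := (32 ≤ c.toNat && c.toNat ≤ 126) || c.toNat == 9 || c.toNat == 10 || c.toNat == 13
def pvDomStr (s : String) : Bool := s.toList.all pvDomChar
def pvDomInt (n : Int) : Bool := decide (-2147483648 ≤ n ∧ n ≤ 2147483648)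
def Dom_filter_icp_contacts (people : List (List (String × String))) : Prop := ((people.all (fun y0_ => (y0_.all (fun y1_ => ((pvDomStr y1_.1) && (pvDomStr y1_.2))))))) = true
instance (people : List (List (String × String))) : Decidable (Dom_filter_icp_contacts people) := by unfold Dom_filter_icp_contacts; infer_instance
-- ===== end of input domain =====

-- B replaces A's comparison sort of the ICP contacts by a stable 5-bucket sort keyed on the
-- seniority score and builds the contact list with a filter+map instead of A's flag-setting
-- accumulator loop (objective: alternative, same observable results).

-- ===== PORT A =====
def pvIcpJobFunctions : List String := ["Engineering", "Technology", "IT", "Data Science", "Research"]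

def pvTitleKeywordsA : List String :=
  ["cto", "chief", "vp", "vice president", "head of",
   "director", "principal", "staff", "lead", "manager",
   "engineer", "architect", "scientist"]

def pvMkContactA (person : List (String × String)) : List (String × String) :=
  [("name", PySem.Dict.getD (PySem.Dict.mk person) "name" ""),
   ("title", PySem.Dict.getD (PySem.Dict.mk person) "job_title" ""),
   ("email", PySem.Dict.getD (PySem.Dict.mk person) "email" ""),
   ("linkedin", PySem.Dict.getD (PySem.Dict.mk person) "linkedin_url" ""),
   ("job_function", PySem.Dict.getD (PySem.Dict.mk person) "job_function" "")]

def pvTitleScoreA (contact : List (String × String)) : Int :=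
  let title := PySem.Str.lower (PySem.Dict.getD (PySem.Dict.mk contact) "title" "")
  if (["cto", "chief"] : List String).any (fun t => PySem.Str.isIn t title) then 0
  else if (["vp", "vice president"] : List String).any (fun t => PySem.Str.isIn t title) then 1
  else if (["head of", "director"] : List String).any (fun t => PySem.Str.isIn t title) then 2
  else if (["principal", "staff"] : List String).any (fun t => PySem.Str.isIn t title) then 3
  else 4

def filter_icp_contacts (people : List (List (String × String))) : List (List (String × String)) :=
  let icp_contacts := people.foldl (fun acc person =>
    -- (person.get('job_title') or '').lower(): a missing key gives None → ''; '' stays ''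
    let title := PySem.Str.lower ((PySem.Dict.get? (PySem.Dict.mk person) "job_title").getD "")
    let job_function := PySem.Dict.getD (PySem.Dict.mk person) "job_function" ""
    let is_icp := false
    let is_icp := if pvIcpJobFunctions.contains job_function then true else is_icp
    let is_icp := if pvTitleKeywordsA.any (fun kw => PySem.Str.isIn kw title) then true else is_icp
    if is_icp then acc ++ [pvMkContactA person] else acc) []
  (PySem.List.sorted icp_contacts pvTitleScoreA).take 5   -- icp_contacts[:5] after the stable sort

-- ===== PORT B =====
def pvIcpJobFunctionsB : List String := ["Engineering", "Technology", "IT", "Data Science", "Research"]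

def pvTitleKeywordsB : List String :=
  ["cto", "chief", "vp", "vice president", "head of",
   "director", "principal", "staff", "lead", "manager",
   "engineer", "architect", "scientist"]

def pvIsIcpB (person : List (String × String)) : Bool :=
  let title := PySem.Str.lower ((PySem.Dict.get? (PySem.Dict.mk person) "job_title").getD "")
  pvIcpJobFunctionsB.contains (PySem.Dict.getD (PySem.Dict.mk person) "job_function" "")
    || pvTitleKeywordsB.any (fun kw => PySem.Str.isIn kw title)

def pvMkContactB (person : List (String × String)) : List (String × String) :=
  [("name", PySem.Dict.getD (PySem.Dict.mk person) "name" ""),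
   ("title", PySem.Dict.getD (PySem.Dict.mk person) "job_title" ""),
   ("email", PySem.Dict.getD (PySem.Dict.mk person) "email" ""),
   ("linkedin", PySem.Dict.getD (PySem.Dict.mk person) "linkedin_url" ""),
   ("job_function", PySem.Dict.getD (PySem.Dict.mk person) "job_function" "")]

def pvTitleScoreB (contact : List (String × String)) : Int :=
  let title := PySem.Str.lower (PySem.Dict.getD (PySem.Dict.mk contact) "title" "")
  if (["cto", "chief"] : List String).any (fun t => PySem.Str.isIn t title) then 0
  else if (["vp", "vice president"] : List String).any (fun t => PySem.Str.isIn t title) then 1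
  else if (["head of", "director"] : List String).any (fun t => PySem.Str.isIn t title) then 2
  else if (["principal", "staff"] : List String).any (fun t => PySem.Str.isIn t title) then 3
  else 4

-- buckets[_title_score(contact)].append(contact): the tuple index 0‥4 is rendered as an if-chain
def pvBucketStep
    (b : List (List (String × String)) × List (List (String × String)) × List (List (String × String)) ×
         List (List (String × String)) × List (List (String × String)))
    (c : List (String × String)) :
    List (List (String × String)) × List (List (String × String)) × List (List (String × String)) ×
    List (List (String × String)) × List (List (String × String)) :=
  let s := pvTitleScoreB c
  if s = 0 then (b.1 ++ [c], b.2.1, b.2.2.1, b.2.2.2.1, b.2.2.2.2)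
  else if s = 1 then (b.1, b.2.1 ++ [c], b.2.2.1, b.2.2.2.1, b.2.2.2.2)
  else if s = 2 then (b.1, b.2.1, b.2.2.1 ++ [c], b.2.2.2.1, b.2.2.2.2)
  else if s = 3 then (b.1, b.2.1, b.2.2.1, b.2.2.2.1 ++ [c], b.2.2.2.2)
  else (b.1, b.2.1, b.2.2.1, b.2.2.2.1, b.2.2.2.2 ++ [c])

def filter_icp_contacts_alt (people : List (List (String × String))) : List (List (String × String)) :=
  let icp_contacts := (people.filter pvIsIcpB).map pvMkContactB
  let buckets := icp_contacts.foldl pvBucketStep ([], [], [], [], [])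
  (buckets.1 ++ buckets.2.1 ++ buckets.2.2.1 ++ buckets.2.2.2.1 ++ buckets.2.2.2.2).take 5

-- ===== PRECONDITION & SPEC =====
def Spec_filter_icp_contacts (people : List (List (String × String))) (out : List (List (String × String))) : Prop := out = filter_icp_contacts_alt people
instance (people : List (List (String × String))) (out : List (List (String × String))) : Decidable (Spec_filter_icp_contacts people out) := by unfold Spec_filter_icp_contacts; infer_instance

-- ===== CLAIM (what is proved, stated in full; the proofs are below) =====
def Claim_equal_filter_icp_contacts : Prop := ∀ (people : List (List (String × String))), Dom_filter_icp_contacts people → Spec_filter_icp_contacts people (filter_icp_contacts people)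

-- ===== LEMMAS AND PROOFS =====

-- the bucket of score i, as a filter
def pvF {α : Type} (key : α → Int) (i : Int) (xs : List α) : List α :=
  xs.filter (fun x => decide (key x = i))

theorem pv_insertBy_cons {α : Type} (before : α → α → Bool) (x y : α) (ys : List α) :
    PySem.List.insertBy before x (y :: ys) =
      if before x y then x :: y :: ys else y :: PySem.List.insertBy before x ys := rfl

theorem pv_insertBy_append_of_not {α : Type} (before : α → α → Bool) (x : α) (l r : List α)
    (hl : ∀ y ∈ l, before x y = false) :
    PySem.List.insertBy before x (l ++ r) = l ++ PySem.List.insertBy before x r := by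
  induction l with
  | nil => simp
  | cons y t ih =>
    simp only [List.cons_append, pv_insertBy_cons, hl y (List.mem_cons_self),
      Bool.false_eq_true, if_false]
    rw [ih (fun z hz => hl z (List.mem_cons_of_mem _ hz))]

theorem pv_insertBy_of_all_before {α : Type} (before : α → α → Bool) (x : α) (r : List α)
    (hr : ∀ y ∈ r, before x y = true) :
    PySem.List.insertBy before x r = x :: r := by
  cases r with
  | nil => rfl
  | cons y t => rw [pv_insertBy_cons, hr y (List.mem_cons_self), if_pos rfl]

theorem pv_insertBy_into {α : Type} (before : α → α → Bool) (x : α) (l r : List α)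
    (hl : ∀ y ∈ l, before x y = false) (hr : ∀ y ∈ r, before x y = true) :
    PySem.List.insertBy before x (l ++ r) = l ++ x :: r := by
  rw [pv_insertBy_append_of_not before x l r hl, pv_insertBy_of_all_before before x r hr]

theorem pv_sorted_snoc {α : Type} (xs : List α) (x : α) (key : α → Int) :
    PySem.List.sorted (xs ++ [x]) key =
      PySem.List.insertBy (fun a b => decide (key a < key b)) x (PySem.List.sorted xs key) := by
  rw [PySem.List.sorted_eq_foldl_insertBy, PySem.List.sorted_eq_foldl_insertBy, List.foldl_append]
  rfl

theorem pv_mem_pvF {α : Type} {key : α → Int} {i : Int} {xs : List α} {y : α}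
    (h : y ∈ pvF key i xs) : key y = i := by
  simp only [pvF, List.mem_filter, decide_eq_true_eq] at h
  exact h.2

-- a stable sort whose keys lie in {0,…,4} is the concatenation of the five score buckets
theorem pv_sorted_bucket5 {α : Type} (key : α → Int) (xs : List α)
    (h : ∀ x ∈ xs, 0 ≤ key x ∧ key x ≤ 4) :
    PySem.List.sorted xs key =
      pvF key 0 xs ++ pvF key 1 xs ++ pvF key 2 xs ++ pvF key 3 xs ++ pvF key 4 xs := by
  induction xs using List.reverseRecOn with
  | nil => rfl
  | append_singleton xs x ih =>
    have hx := h x (by simp)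
    have hxs : ∀ y ∈ xs, 0 ≤ key y ∧ key y ≤ 4 := fun y hy => h y (by simp [hy])
    rw [pv_sorted_snoc, ih hxs]
    have hcase : key x = 0 ∨ key x = 1 ∨ key x = 2 ∨ key x = 3 ∨ key x = 4 := by omega
    have hfilt : ∀ i : Int, pvF key i (xs ++ [x]) =
        pvF key i xs ++ (if key x = i then [x] else []) := by
      intro i
      simp only [pvF, List.filter_append, List.filter_cons, List.filter_nil]
      split_ifs with hki <;> simp_all
    rcases hcase with hk | hk | hk | hk | hk
    · rw [show pvF key 0 xs ++ pvF key 1 xs ++ pvF key 2 xs ++ pvF key 3 xs ++ pvF key 4 xs =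
          pvF key 0 xs ++ (pvF key 1 xs ++ pvF key 2 xs ++ pvF key 3 xs ++ pvF key 4 xs) by
            simp [List.append_assoc],
        pv_insertBy_into _ x _ _
          (by intro y hy; simp [hk, pv_mem_pvF hy])
          (by intro y hy
              simp only [List.append_assoc, List.mem_append] at hy
              rcases hy with hy | hy | hy | hy <;> simp [hk, pv_mem_pvF hy])]
      simp [hfilt, hk, List.append_assoc]
    · rw [show pvF key 0 xs ++ pvF key 1 xs ++ pvF key 2 xs ++ pvF key 3 xs ++ pvF key 4 xs =
          (pvF key 0 xs ++ pvF key 1 xs) ++ (pvF key 2 xs ++ pvF key 3 xs ++ pvF key 4 xs) by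
            simp [List.append_assoc],
        pv_insertBy_into _ x _ _
          (by intro y hy
              simp only [List.mem_append] at hy
              rcases hy with hy | hy <;> simp [hk, pv_mem_pvF hy])
          (by intro y hy
              simp only [List.append_assoc, List.mem_append] at hy
              rcases hy with hy | hy | hy <;> simp [hk, pv_mem_pvF hy])]
      simp [hfilt, hk, List.append_assoc]
    · rw [show pvF key 0 xs ++ pvF key 1 xs ++ pvF key 2 xs ++ pvF key 3 xs ++ pvF key 4 xs =
          (pvF key 0 xs ++ pvF key 1 xs ++ pvF key 2 xs) ++ (pvF key 3 xs ++ pvF key 4 xs) by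
            simp [List.append_assoc],
        pv_insertBy_into _ x _ _
          (by intro y hy
              simp only [List.append_assoc, List.mem_append] at hy
              rcases hy with hy | hy | hy <;> simp [hk, pv_mem_pvF hy])
          (by intro y hy
              simp only [List.mem_append] at hy
              rcases hy with hy | hy <;> simp [hk, pv_mem_pvF hy])]
      simp [hfilt, hk, List.append_assoc]
    · rw [show pvF key 0 xs ++ pvF key 1 xs ++ pvF key 2 xs ++ pvF key 3 xs ++ pvF key 4 xs =
          (pvF key 0 xs ++ pvF key 1 xs ++ pvF key 2 xs ++ pvF key 3 xs) ++ pvF key 4 xs by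
            simp [List.append_assoc],
        pv_insertBy_into _ x _ _
          (by intro y hy
              simp only [List.append_assoc, List.mem_append] at hy
              rcases hy with hy | hy | hy | hy <;> simp [hk, pv_mem_pvF hy])
          (by intro y hy; simp [hk, pv_mem_pvF hy])]
      simp [hfilt, hk, List.append_assoc]
    · rw [show pvF key 0 xs ++ pvF key 1 xs ++ pvF key 2 xs ++ pvF key 3 xs ++ pvF key 4 xs =
          (pvF key 0 xs ++ pvF key 1 xs ++ pvF key 2 xs ++ pvF key 3 xs ++ pvF key 4 xs) ++ [] by
            simp,
        pv_insertBy_into _ x _ _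
          (by intro y hy
              simp only [List.append_assoc, List.mem_append] at hy
              rcases hy with hy | hy | hy | hy | hy <;> simp [hk, pv_mem_pvF hy])
          (by intro y hy; simp at hy)]
      simp [hfilt, hk, List.append_assoc]

theorem pv_score_range (c : List (String × String)) :
    pvTitleScoreB c = 0 ∨ pvTitleScoreB c = 1 ∨ pvTitleScoreB c = 2 ∨
      pvTitleScoreB c = 3 ∨ pvTitleScoreB c = 4 := by
  unfold pvTitleScoreB
  dsimp only
  split_ifs <;> simp

theorem pv_foldl_buckets (xs : List (List (String × String)))
    (t0 t1 t2 t3 t4 : List (List (String × String))) :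
    xs.foldl pvBucketStep (t0, t1, t2, t3, t4) =
      (t0 ++ pvF pvTitleScoreB 0 xs, t1 ++ pvF pvTitleScoreB 1 xs, t2 ++ pvF pvTitleScoreB 2 xs,
       t3 ++ pvF pvTitleScoreB 3 xs, t4 ++ pvF pvTitleScoreB 4 xs) := by
  induction xs generalizing t0 t1 t2 t3 t4 with
  | nil => simp [pvF]
  | cons c tl ih =>
    rcases pv_score_range c with h | h | h | h | h <;>
      simp only [List.foldl_cons, pvBucketStep, h] <;> norm_num <;>
      rw [ih] <;> simp [pvF, h]

theorem pv_loopA_eq (people : List (List (String × String))) :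
    people.foldl (fun acc person =>
      let title := PySem.Str.lower ((PySem.Dict.get? (PySem.Dict.mk person) "job_title").getD "")
      let job_function := PySem.Dict.getD (PySem.Dict.mk person) "job_function" ""
      let is_icp := false
      let is_icp := if pvIcpJobFunctions.contains job_function then true else is_icp
      let is_icp := if pvTitleKeywordsA.any (fun kw => PySem.Str.isIn kw title) then true else is_icp
      if is_icp then acc ++ [pvMkContactA person] else acc) [] =
    (people.filter pvIsIcpB).map pvMkContactB := by
  have hfun : (fun (acc : List (List (String × String))) person =>
      let title := PySem.Str.lower ((PySem.Dict.get? (PySem.Dict.mk person) "job_title").getD "")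
      let job_function := PySem.Dict.getD (PySem.Dict.mk person) "job_function" ""
      let is_icp := false
      let is_icp := if pvIcpJobFunctions.contains job_function then true else is_icp
      let is_icp := if pvTitleKeywordsA.any (fun kw => PySem.Str.isIn kw title) then true else is_icp
      if is_icp then acc ++ [pvMkContactA person] else acc) =
      (fun acc person => if pvIsIcpB person then acc ++ [pvMkContactB person] else acc) := by
    funext acc person
    show (if (if pvTitleKeywordsA.any (fun kw =>
                  PySem.Str.isIn kw (PySem.Str.lower ((PySem.Dict.get? (PySem.Dict.mk person) "job_title").getD "")))
              then true
              else if pvIcpJobFunctions.contains (PySem.Dict.getD (PySem.Dict.mk person) "job_function" "")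
                then true else false) = true
          then acc ++ [pvMkContactA person] else acc) =
        (if pvIsIcpB person = true then acc ++ [pvMkContactB person] else acc)
    have hmk : pvMkContactA person = pvMkContactB person := rfl
    have hicp : pvIsIcpB person =
        (if pvTitleKeywordsA.any (fun kw =>
              PySem.Str.isIn kw (PySem.Str.lower ((PySem.Dict.get? (PySem.Dict.mk person) "job_title").getD "")))
          then true
          else if pvIcpJobFunctions.contains (PySem.Dict.getD (PySem.Dict.mk person) "job_function" "")
            then true else false) := by
      unfold pvIsIcpB
      have hKW : pvTitleKeywordsB = pvTitleKeywordsA := rfl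
      have hJF : pvIcpJobFunctionsB = pvIcpJobFunctions := rfl
      rw [hKW, hJF]
      cases h1 : pvIcpJobFunctions.contains (PySem.Dict.getD (PySem.Dict.mk person) "job_function" "") <;>
        cases h2 : pvTitleKeywordsA.any (fun kw =>
            PySem.Str.isIn kw (PySem.Str.lower ((PySem.Dict.get? (PySem.Dict.mk person) "job_title").getD ""))) <;>
        simp only [h2] <;> rfl
    rw [hicp, hmk]
  rw [hfun, PySem.List.foldl_append_if]
  simp

-- ===== VERDICT (by name: the statement is the Claim_ definition above) =====
theorem filter_icp_contacts_spec : Claim_equal_filter_icp_contacts := by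
  intro people _
  unfold Spec_filter_icp_contacts filter_icp_contacts filter_icp_contacts_alt
  simp only []
  rw [pv_loopA_eq people]
  have hscore : pvTitleScoreA = pvTitleScoreB := rfl
  rw [hscore]
  rw [pv_sorted_bucket5 pvTitleScoreB ((people.filter pvIsIcpB).map pvMkContactB)
      (fun c _ => by rcases pv_score_range c with h | h | h | h | h <;> omega)]
  rw [pv_foldl_buckets]
  simp [List.append_assoc]
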